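-- pv_equiv track=rewrite | github.com/Wulfic/Cicada3301 | Tools/combined_pages_analysis.py | columnar_read
-- ===== SOURCE A (Python) =====
-- def columnar_read(indices, num_cols):
--     """Read indices column by column instead of row by row"""
--     num_rows = (len(indices) + num_cols - 1) // num_cols
--     grid = [[None] * num_cols for _ in range(num_rows)]
--
--     # Fill grid row by row
--     idx = 0
--     for r in range(num_rows):
--         for c in range(num_cols):
--             if idx < len(indices):
--                 grid[r][c] = indices[idx]
--                 idx += 1
--
--     # Read column by column
--     result = []
--     for c in range(num_cols):
--         for r in range(num_rows):
--             if grid[r][c] is not None: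
--                 result.append(grid[r][c])
--
--     return result
-- ===== SOURCE B (Python) =====
-- def columnar_read(indices, num_cols):
--     """Read indices column by column instead of row by row (no grid: index arithmetic)."""
--     n = len(indices)
--     num_rows = (n + num_cols - 1) // num_cols
--     return [indices[r * num_cols + c]
--             for c in range(num_cols)
--             for r in range(num_rows)
--             if r * num_cols + c < n]
-- ===== Notes on version B (the rewrite author's own statement) =====
-- stated objective: simpler
-- what changed: B drops A's intermediate None-filled grid entirely and emits the column-major order directly with index arithmetic (idx = r*num_cols + c) in a single comprehension.
import Mathlib
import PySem

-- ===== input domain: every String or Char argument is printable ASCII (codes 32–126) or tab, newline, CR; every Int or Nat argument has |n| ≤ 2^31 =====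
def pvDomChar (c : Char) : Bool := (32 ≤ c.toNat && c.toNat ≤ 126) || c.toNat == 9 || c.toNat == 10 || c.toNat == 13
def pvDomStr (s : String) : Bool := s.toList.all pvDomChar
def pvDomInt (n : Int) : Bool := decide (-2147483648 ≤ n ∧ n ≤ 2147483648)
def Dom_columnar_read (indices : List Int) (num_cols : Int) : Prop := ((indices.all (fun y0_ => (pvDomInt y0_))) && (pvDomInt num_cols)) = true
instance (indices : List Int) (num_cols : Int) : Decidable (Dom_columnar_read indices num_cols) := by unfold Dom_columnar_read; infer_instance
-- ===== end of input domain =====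

-- B replaces A's intermediate None-filled grid (fill row-major, read column-major) by direct
-- index arithmetic idx = r*num_cols + c in one pass; objective: simpler (no grid).

-- ===== PORT A =====
-- grid[r][c] read (in A always applied with r, c inside the grid's bounds)
def pvCellGet (g : List (List (Option Int))) (r c : Int) : Option Int :=
  (g.getD r.toNat []).getD c.toNat none

-- grid[r][c] = v  (mutation, as functional update; in A always in bounds)
def pvCellSet (g : List (List (Option Int))) (r c : Int) (v : Int) : List (List (Option Int)) :=
  g.set r.toNat ((g.getD r.toNat []).set c.toNat (some v))

-- body of A's fill loop: 'if idx < len(indices): grid[r][c] = indices[idx]; idx += 1'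
def pvFillStep (indices : List Int) (st : List (List (Option Int)) × Int) (r c : Int) :
    List (List (Option Int)) × Int :=
  if st.2 < (indices.length : Int) then
    (pvCellSet st.1 r c (PySem.List.pyGetD indices st.2 0), st.2 + 1)
  else st

-- A's inner fill loop: 'for c in range(num_cols): …' for one row r
def pvFillRow (indices : List Int) (num_cols : Int)
    (st : List (List (Option Int)) × Int) (r : Int) : List (List (Option Int)) × Int :=
  (PySem.List.pyRange 0 num_cols 1).foldl (fun st c => pvFillStep indices st r c) st

-- body of A's read loop: 'if grid[r][c] is not None: result.append(grid[r][c])'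
def pvReadStep (res : List Int) (o : Option Int) : List Int :=
  match o with
  | some v => res ++ [v]
  | none => res

def columnar_read (indices : List Int) (num_cols : Int) : List Int :=
  let n : Int := (indices.length : Int)
  let num_rows : Int := PySem.Int.floordiv (n + num_cols - 1) num_cols
  -- grid = [[None] * num_cols for _ in range(num_rows)]
  let grid0 : List (List (Option Int)) :=
    (PySem.List.pyRange 0 num_rows 1).map (fun _ => List.replicate num_cols.toNat none)
  -- fill grid row by row, carrying (grid, idx)
  let st := (PySem.List.pyRange 0 num_rows 1).foldl (pvFillRow indices num_cols) (grid0, (0 : Int))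
  -- read column by column
  (PySem.List.pyRange 0 num_cols 1).foldl
    (fun res c => (PySem.List.pyRange 0 num_rows 1).foldl
      (fun res r => pvReadStep res (pvCellGet st.1 r c)) res)
    []

-- ===== PORT B =====
def columnar_read_alt (indices : List Int) (num_cols : Int) : List Int :=
  let n : Int := (indices.length : Int)
  let num_rows : Int := PySem.Int.floordiv (n + num_cols - 1) num_cols
  (PySem.List.pyRange 0 num_cols 1).flatMap (fun c =>
    (PySem.List.pyRange 0 num_rows 1).filterMap (fun r =>
      if r * num_cols + c < n then some (PySem.List.pyGetD indices (r * num_cols + c) 0)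
      else none))

-- ===== PRECONDITION & SPEC =====
-- A raises ZeroDivisionError exactly when num_cols == 0 (the ceiling division); excluded.
def Pre_columnar_read (indices : List Int) (num_cols : Int) : Prop := num_cols ≠ 0
instance (indices : List Int) (num_cols : Int) : Decidable (Pre_columnar_read indices num_cols) := by
  unfold Pre_columnar_read; infer_instance

def pvWitness_columnar_read : List Int × Int := ([1, 2, 3, 4, 5], 2)

def Spec_columnar_read (indices : List Int) (num_cols : Int) (out : List Int) : Prop :=
  out = columnar_read_alt indices num_cols
instance (indices : List Int) (num_cols : Int) (out : List Int) :
    Decidable (Spec_columnar_read indices num_cols out) := by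
  unfold Spec_columnar_read; infer_instance

-- ===== CLAIM (what is proved, stated in full; the proofs are below) =====
def Claim_equal_columnar_read : Prop :=
  ∀ (indices : List Int) (num_cols : Int), Dom_columnar_read indices num_cols →
    Pre_columnar_read indices num_cols →
    Spec_columnar_read indices num_cols (columnar_read indices num_cols)

-- ===== LEMMAS AND PROOFS =====

-- the grid's shape: Rn rows, each of length Kn
def pvShape (g : List (List (Option Int))) (Rn Kn : Nat) : Prop :=
  g.length = Rn ∧ ∀ j : Nat, j < Rn → (g.getD j []).length = Kn

lemma pvReadStep_eq (res : List Int) (o : Option Int) : pvReadStep res o = res ++ o.toList := by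
  cases o <;> simp [pvReadStep]

lemma pvGrid0_eq (R K : Int) :
    (PySem.List.pyRange 0 R 1).map (fun _ => List.replicate K.toNat (none : Option Int))
      = List.replicate R.toNat (List.replicate K.toNat none) := by
  rw [List.map_const']
  congr 1
  simp [PySem.List.length_pyRange_one]

lemma pvShape_grid0 (R K : Int) (hR : 0 ≤ R) :
    pvShape ((PySem.List.pyRange 0 R 1).map (fun _ => List.replicate K.toNat none)) R.toNat K.toNat := by
  rw [pvGrid0_eq]
  constructor
  · simp
  · intro j hj
    simp [List.getD_eq_getElem?_getD, List.getElem?_replicate, hj]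

lemma pvCellGet_grid0 (R K : Int) (r c : Int) :
    pvCellGet ((PySem.List.pyRange 0 R 1).map (fun _ => List.replicate K.toNat none)) r c = none := by
  rw [pvGrid0_eq]
  unfold pvCellGet
  rcases Nat.lt_or_ge r.toNat R.toNat with h | h <;>
    rcases Nat.lt_or_ge c.toNat K.toNat with h2 | h2 <;>
      simp [List.getD_eq_getElem?_getD, List.getElem?_replicate, h, h2, Nat.not_lt.2]

lemma pvCellSet_shape (g : List (List (Option Int))) (r c : Int) (v : Int) (Rn Kn : Nat)
    (hsh : pvShape g Rn Kn) (hr : r.toNat < Rn) :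
    pvShape (pvCellSet g r c v) Rn Kn := by
  obtain ⟨hlen, hrow⟩ := hsh
  refine ⟨by simpa [pvCellSet] using hlen, ?_⟩
  intro j hj
  by_cases hje : j = r.toNat
  · have h1 : (pvCellSet g r c v).getD j [] = (g.getD r.toNat []).set c.toNat (some v) := by
      rw [hje]
      simp [pvCellSet, List.getD_eq_getElem?_getD,
        List.getElem?_set_self (show r.toNat < g.length by omega)]
    rw [h1, List.length_set]
    exact hrow r.toNat hr
  · have h1 : (pvCellSet g r c v).getD j [] = g.getD j [] := by
      simp [pvCellSet, List.getD_eq_getElem?_getD,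
        List.getElem?_set_ne (show r.toNat ≠ j by omega)]
    rw [h1]
    exact hrow j hj

lemma pvCellGet_set (g : List (List (Option Int))) (r c r' c' : Int) (v : Int)
    (hr : 0 ≤ r) (hc : 0 ≤ c) (hr' : 0 ≤ r') (hc' : 0 ≤ c')
    (hrg : r.toNat < g.length) (hcg : c.toNat < (g.getD r.toNat []).length) :
    pvCellGet (pvCellSet g r c v) r' c' =
      if r' = r ∧ c' = c then some v else pvCellGet g r' c' := by
  unfold pvCellGet pvCellSet
  rw [List.getD_eq_getElem?_getD] at hcg
  by_cases hre : r' = r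
  · have hrow : (g.set r.toNat ((g.getD r.toNat []).set c.toNat (some v))).getD r'.toNat [] =
        (g.getD r.toNat []).set c.toNat (some v) := by
      rw [hre]
      simp [List.getD_eq_getElem?_getD, List.getElem?_set_self hrg]
    rw [hrow]
    by_cases hce : c' = c
    · simp [hce, hre, List.getD_eq_getElem?_getD, List.getElem?_set_self hcg]
    · have hcne : c.toNat ≠ c'.toNat := fun h => hce (by omega)
      simp [List.getD_eq_getElem?_getD, List.getElem?_set_ne hcne, hre, hce]
  · have hrne : r.toNat ≠ r'.toNat := fun h => hre (by omega)
    have hrow : (g.set r.toNat ((g.getD r.toNat []).set c.toNat (some v))).getD r'.toNat [] =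
        g.getD r'.toNat [] := by
      simp [List.getD_eq_getElem?_getD, List.getElem?_set_ne hrne]
    rw [hrow]
    simp [hre, List.getD_eq_getElem?_getD]

-- one row of A's fill loop, processed through column cn
lemma pvRowFill (indices : List Int) (K : Int) (hK : 0 < K) (r : Int) (hr0 : 0 ≤ r)
    (cn : Nat) (hcn : (cn : Int) ≤ K) (g : List (List (Option Int))) (Rn : Nat)
    (hsh : pvShape g Rn K.toNat) (hr : r.toNat < Rn) :
    (pvShape ((PySem.List.pyRange 0 (cn : Int) 1).foldl (fun st c => pvFillStep indices st r c)
        (g, min (r * K) (indices.length : Int))).1 Rn K.toNat) ∧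
    ((PySem.List.pyRange 0 (cn : Int) 1).foldl (fun st c => pvFillStep indices st r c)
        (g, min (r * K) (indices.length : Int))).2
      = min (r * K + (cn : Int)) (indices.length : Int) ∧
    (∀ r' c' : Int, 0 ≤ r' → 0 ≤ c' →
      pvCellGet ((PySem.List.pyRange 0 (cn : Int) 1).foldl (fun st c => pvFillStep indices st r c)
          (g, min (r * K) (indices.length : Int))).1 r' c'
        = if r' = r ∧ c' < (cn : Int) ∧ r * K + c' < (indices.length : Int)
          then some (PySem.List.pyGetD indices (r * K + c') 0)
          else pvCellGet g r' c') := by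
  induction cn with
  | zero =>
    rw [show ((0 : Nat) : Int) = 0 from rfl, PySem.List.pyRange_one_eq_nil le_rfl]
    simp only [List.foldl_nil]
    refine ⟨hsh, by omega, ?_⟩
    intro r' c' hr' hc'
    rw [if_neg (by rintro ⟨_, h, _⟩; omega)]
  | succ cm ih =>
    have hcm : (cm : Int) ≤ K := by push_cast at hcn ⊢; omega
    obtain ⟨ihsh, ihidx, ihcell⟩ := ih hcm
    have hsplit : PySem.List.pyRange 0 ((cm + 1 : Nat) : Int) 1
        = PySem.List.pyRange 0 (cm : Int) 1 ++ [(cm : Int)] := by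
      have h := PySem.List.pyRange_one_succ_right (a := 0) (b := (cm : Int)) (by positivity)
      push_cast
      push_cast at h
      exact h
    rw [hsplit, List.foldl_append]
    set st := (PySem.List.pyRange 0 (cm : Int) 1).foldl (fun st c => pvFillStep indices st r c)
      (g, min (r * K) (indices.length : Int)) with hst
    simp only [List.foldl_cons, List.foldl_nil]
    have hrlen : r.toNat < st.1.length := by rw [ihsh.1]; exact hr
    by_cases hlt : r * K + (cm : Int) < (indices.length : Int)
    · have hguard : st.2 < (indices.length : Int) := by rw [ihidx]; omega
      have hstep : pvFillStep indices st r (cm : Int)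
          = (pvCellSet st.1 r (cm : Int) (PySem.List.pyGetD indices st.2 0), st.2 + 1) := by
        unfold pvFillStep
        rw [if_pos hguard]
      rw [hstep]
      have hidxval : st.2 = r * K + (cm : Int) := by rw [ihidx]; omega
      have hclen : (cm : Int).toNat < (st.1.getD r.toNat []).length := by
        rw [ihsh.2 r.toNat hr]; omega
      refine ⟨pvCellSet_shape st.1 r (cm : Int) _ Rn K.toNat ihsh hr, ?_, ?_⟩
      · show st.2 + 1 = _
        rw [hidxval]; push_cast; omega
      · intro r' c' hr' hc'
        show pvCellGet (pvCellSet st.1 r (cm : Int) (PySem.List.pyGetD indices st.2 0)) r' c' = _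
        rw [pvCellGet_set st.1 r (cm : Int) r' c' _ hr0 (by positivity) hr' hc' hrlen hclen]
        rw [ihcell r' c' hr' hc', hidxval]
        by_cases h1 : r' = r ∧ c' = (cm : Int)
        · rw [if_pos h1, if_pos ⟨h1.1, by push_cast; omega, by rw [h1.2]; exact hlt⟩, h1.2]
        · rw [if_neg h1]
          by_cases h2 : r' = r ∧ c' < (cm : Int) ∧ r * K + c' < (indices.length : Int)
          · rw [if_pos h2, if_pos ⟨h2.1, by push_cast; omega, h2.2.2⟩]
          · rw [if_neg h2, if_neg ?_]
            rintro ⟨ha, hb, hd⟩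
            push_cast at hb
            rcases lt_or_eq_of_le (show c' ≤ (cm : Int) by omega) with h | h
            · exact h2 ⟨ha, h, hd⟩
            · exact h1 ⟨ha, h⟩
    · have hguard : ¬ st.2 < (indices.length : Int) := by rw [ihidx]; omega
      have hstep : pvFillStep indices st r (cm : Int) = st := by
        unfold pvFillStep
        rw [if_neg hguard]
      rw [hstep]
      refine ⟨ihsh, by rw [ihidx]; push_cast; omega, ?_⟩
      intro r' c' hr' hc'
      rw [ihcell r' c' hr' hc']
      by_cases h2 : r' = r ∧ c' < (cm : Int) ∧ r * K + c' < (indices.length : Int)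
      · rw [if_pos h2, if_pos ⟨h2.1, by push_cast; omega, h2.2.2⟩]
      · rw [if_neg h2, if_neg ?_]
        rintro ⟨ha, hb, hd⟩
        push_cast at hb
        refine h2 ⟨ha, ?_, hd⟩
        rcases lt_or_eq_of_le (show c' ≤ (cm : Int) by omega) with h | h
        · exact h
        · rw [h] at hd; exact absurd hd hlt

-- A's whole fill loop, processed through row m
lemma pvGridFill (indices : List Int) (K : Int) (hK : 0 < K) (R : Int) (hR : 0 ≤ R)
    (m : Nat) (hm : (m : Int) ≤ R) :
    (pvShape ((PySem.List.pyRange 0 (m : Int) 1).foldl (pvFillRow indices K)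
        ((PySem.List.pyRange 0 R 1).map (fun _ => List.replicate K.toNat none), (0 : Int))).1
        R.toNat K.toNat) ∧
    ((PySem.List.pyRange 0 (m : Int) 1).foldl (pvFillRow indices K)
        ((PySem.List.pyRange 0 R 1).map (fun _ => List.replicate K.toNat none), (0 : Int))).2
      = min ((m : Int) * K) (indices.length : Int) ∧
    (∀ r' c' : Int, 0 ≤ r' → 0 ≤ c' →
      pvCellGet ((PySem.List.pyRange 0 (m : Int) 1).foldl (pvFillRow indices K)
          ((PySem.List.pyRange 0 R 1).map (fun _ => List.replicate K.toNat none), (0 : Int))).1 r' c'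
        = if r' < (m : Int) ∧ c' < K ∧ r' * K + c' < (indices.length : Int)
          then some (PySem.List.pyGetD indices (r' * K + c') 0)
          else none) := by
  induction m with
  | zero =>
    rw [show ((0 : Nat) : Int) = 0 from rfl, PySem.List.pyRange_one_eq_nil le_rfl]
    simp only [List.foldl_nil]
    refine ⟨pvShape_grid0 R K hR, by omega, ?_⟩
    intro r' c' hr' hc'
    rw [pvCellGet_grid0, if_neg (by rintro ⟨h, _, _⟩; omega)]
  | succ mm ih =>
    have hmm : (mm : Int) ≤ R := by push_cast at hm ⊢; omega
    obtain ⟨ihsh, ihidx, ihcell⟩ := ih hmm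
    have hsplit : PySem.List.pyRange 0 ((mm + 1 : Nat) : Int) 1
        = PySem.List.pyRange 0 (mm : Int) 1 ++ [(mm : Int)] := by
      have h := PySem.List.pyRange_one_succ_right (a := 0) (b := (mm : Int)) (by positivity)
      push_cast
      push_cast at h
      exact h
    rw [hsplit, List.foldl_append]
    set st := (PySem.List.pyRange 0 (mm : Int) 1).foldl (pvFillRow indices K)
      ((PySem.List.pyRange 0 R 1).map (fun _ => List.replicate K.toNat none), (0 : Int)) with hst
    simp only [List.foldl_cons, List.foldl_nil]
    have hrowfold : pvFillRow indices K st (mm : Int)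
        = (PySem.List.pyRange 0 (K.toNat : Int) 1).foldl
            (fun s c => pvFillStep indices s (mm : Int) c)
            (st.1, min ((mm : Int) * K) (indices.length : Int)) := by
      unfold pvFillRow
      rw [show ((K.toNat : Nat) : Int) = K from Int.toNat_of_nonneg (le_of_lt hK), ← ihidx]
    have hmmR : (mm : Int).toNat < R.toNat := by omega
    obtain ⟨rsh, ridx, rcell⟩ := pvRowFill indices K hK (mm : Int) (by positivity) K.toNat
      (by rw [Int.toNat_of_nonneg (le_of_lt hK)]) st.1 R.toNat ihsh hmmR
    rw [hrowfold]
    refine ⟨rsh, ?_, ?_⟩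
    · rw [ridx, Int.toNat_of_nonneg (le_of_lt hK)]
      push_cast
      ring_nf
    · intro r' c' hr' hc'
      rw [rcell r' c' hr' hc', ihcell r' c' hr' hc']
      rw [Int.toNat_of_nonneg (le_of_lt hK)]
      by_cases h1 : r' = (mm : Int) ∧ c' < K ∧ (mm : Int) * K + c' < (indices.length : Int)
      · rw [if_pos h1, if_pos ⟨by push_cast; omega, h1.2.1, by rw [h1.1]; exact h1.2.2⟩, h1.1]
      · rw [if_neg h1]
        by_cases h2 : r' < (mm : Int) ∧ c' < K ∧ r' * K + c' < (indices.length : Int)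
        · rw [if_pos h2, if_pos ⟨by push_cast; omega, h2.2.1, h2.2.2⟩]
        · rw [if_neg h2, if_neg ?_]
          rintro ⟨ha, hb, hd⟩
          push_cast at ha
          rcases lt_or_eq_of_le (show r' ≤ (mm : Int) by omega) with h | h
          · exact h2 ⟨h, hb, hd⟩
          · exact h1 ⟨h, hb, by rw [← h]; exact hd⟩

-- ===== VERDICT (by name: the statement is the Claim_ definition above) =====
theorem columnar_read_spec : Claim_equal_columnar_read := by
  intro indices K _ hK
  unfold Spec_columnar_read columnar_read columnar_read_alt
  rcases lt_trichotomy K 0 with hKn | hK0 | hKp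
  · rw [PySem.List.pyRange_one_eq_nil (le_of_lt hKn)]
    simp
  · exact absurd hK0 hK
  · simp only []
    set n : Int := (indices.length : Int) with hn
    set R : Int := PySem.Int.floordiv (n + K - 1) K with hR
    have hn0 : 0 ≤ n := by positivity
    have hbounds : R * K ≤ n + K - 1 ∧ n + K - 1 < (R + 1) * K :=
      (PySem.Int.floordiv_eq_iff_of_pos hKp).1 hR.symm
    have hceil : n ≤ R * K := by
      have h2 : n + K - 1 < R * K + K := by
        have := hbounds.2
        rw [add_mul, one_mul] at this
        exact this
      omega
    have hR0 : 0 ≤ R := by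
      by_contra hneg
      rw [not_le] at hneg
      have : R * K ≤ -K := by
        calc R * K ≤ (-1) * K := by
              apply mul_le_mul_of_nonneg_right _ (le_of_lt hKp)
              omega
          _ = -K := by ring
      omega
    have hRcast : ((R.toNat : Nat) : Int) = R := Int.toNat_of_nonneg hR0
    obtain ⟨gsh, gidx, gcell⟩ := pvGridFill indices K hKp R hR0 R.toNat (by omega)
    rw [hRcast] at gsh gidx gcell
    simp only [pvReadStep_eq, PySem.List.foldl_append_eq_flatMap, List.nil_append,
      List.filterMap_eq_flatMap_toList]
    refine List.flatMap_congr ?_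
    intro c hc
    rw [PySem.List.mem_pyRange_one] at hc
    refine List.flatMap_congr ?_
    intro r hr
    rw [PySem.List.mem_pyRange_one] at hr
    rw [gcell r c hr.1 hc.1]
    by_cases hv : r * K + c < n
    · rw [if_pos ⟨hr.2, hc.2, hv⟩, if_pos hv]
    · rw [if_neg (by rintro ⟨_, _, h⟩; exact hv h), if_neg hv]
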